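-- pv_equiv track=rewrite | github.com/mrayhannur/2024-coding-challenge | 10-number_of_letters.py | numbers_of_letters
-- ===== SOURCE A (Python) =====
-- def numbers_of_letters(n):
--     words = ['zero', 'one', 'two', 'three', 'four', 'five', 'six', 'seven', 'eight', 'nine']
--     list = []
--     string = 'this is just a template'
--
--     # Loop to ensure the length of the string is below 9 (so it can access the words list index)
--     while len(string) > 9:
--         digits = [int(x) for x in str(n)]
--         string = ''
--         for digit in digits:
--             string += words[digit]
--         list.append(string)
--         n = len(string)
--
--     # Looping to get string 'four'
--     while not 'four' in list:
--         string = words[len(string)]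
--         list.append(string)
--
--     return list
-- ===== SOURCE B (Python) =====
-- def numbers_of_letters(n):
--     words = ['zero', 'one', 'two', 'three', 'four', 'five', 'six', 'seven', 'eight', 'nine']
--     result = []
--     s = ''.join(words[int(d)] for d in str(n))
--     result.append(s)
--     while 'four' not in result:
--         n = len(s)
--         s = ''.join(words[int(d)] for d in str(n))
--         result.append(s)
--     return result
-- ===== Notes on version B (the rewrite author's own statement) =====
-- stated objective: simpler
-- what changed: A's two sequential while-loops (a length-guarded digit-spelling phase seeded by a dummy template string, then a words[len] chase) are merged into one do-while-style loop over a single recurrence: spell the digits of the current number, append, and keep spelling len(s) until 'four' appears in the result.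
import Mathlib
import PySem

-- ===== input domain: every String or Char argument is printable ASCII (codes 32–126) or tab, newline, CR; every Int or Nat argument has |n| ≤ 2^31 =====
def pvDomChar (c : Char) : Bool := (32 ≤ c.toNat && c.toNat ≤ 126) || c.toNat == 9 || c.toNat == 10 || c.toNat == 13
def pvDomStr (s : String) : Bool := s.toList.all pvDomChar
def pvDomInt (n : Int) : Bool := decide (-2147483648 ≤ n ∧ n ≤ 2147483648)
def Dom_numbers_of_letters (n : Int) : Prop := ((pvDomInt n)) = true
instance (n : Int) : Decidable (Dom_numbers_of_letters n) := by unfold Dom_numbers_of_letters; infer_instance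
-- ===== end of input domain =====

-- B merges A's two sequential while-loops into one do-while-style loop over a single
-- recurrence (spell the digits, then keep spelling the previous string's length until
-- 'four' appears); objective: simpler.

-- ===== PORT A =====
def pvWordsA : List String :=
  ["zero", "one", "two", "three", "four", "five", "six", "seven", "eight", "nine"]

-- digits = [int(x) for x in str(n)]  (int('-') raises ValueError in Python; Pre_ excludes n < 0)
def pvDigitsA (n : Int) : List Int :=
  (PySem.Int.toStr n).toList.map (fun c => (PySem.Int.ofStr? (String.mk [c])).getD 0)

-- string = ''; for digit in digits: string += words[digit]
def pvSpellA (n : Int) : String :=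
  (pvDigitsA n).foldl (fun s d => s ++ (PySem.List.pyGet? pvWordsA d).getD "") ""

-- while len(string) > 9: …  (fuel is only a totality guard; unused fuel is handed on)
def pvLoopA1 : Nat → Int → String → List String → Nat × String × List String
  | 0, _, s, acc => (0, s, acc)
  | f+1, n, s, acc =>
    if 9 < PySem.Str.len s then
      let s' := pvSpellA n
      pvLoopA1 f (PySem.Str.len s') s' (acc ++ [s'])
    else (f+1, s, acc)

-- while not 'four' in list: string = words[len(string)]; list.append(string)
def pvLoopA2 : Nat → String → List String → List String
  | 0, _, acc => acc
  | f+1, s, acc =>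
    if acc.contains "four" then acc
    else
      let s' := (PySem.List.pyGet? pvWordsA (PySem.Str.len s)).getD ""
      pvLoopA2 f s' (acc ++ [s'])

def numbers_of_letters (n : Int) : List String :=
  let r := pvLoopA1 100 n "this is just a template" []
  pvLoopA2 r.1 r.2.1 r.2.2

-- ===== PORT B =====
def pvWordsB : List String :=
  ["zero", "one", "two", "three", "four", "five", "six", "seven", "eight", "nine"]

-- s = ''.join(words[int(d)] for d in str(n))  (int('-') raises ValueError; Pre_ excludes n < 0)
def pvSpellB (n : Int) : String :=
  PySem.Str.join ""
    ((PySem.Int.toStr n).toList.map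
      (fun c => (PySem.List.pyGet? pvWordsB ((PySem.Int.ofStr? (String.mk [c])).getD 0)).getD ""))

-- while 'four' not in result: n = len(s); s = spell(n); result.append(s)
def pvLoopB : Nat → String → List String → List String
  | 0, _, acc => acc
  | f+1, s, acc =>
    if acc.contains "four" then acc
    else
      let s' := pvSpellB (PySem.Str.len s)
      pvLoopB f s' (acc ++ [s'])

def numbers_of_letters_alt (n : Int) : List String :=
  let s := pvSpellB n
  pvLoopB 99 s [s]

-- ===== PRECONDITION & SPEC =====
-- Pre_ excludes n < 0, where Python A raises ValueError (int('-') on the sign character).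
def Pre_numbers_of_letters (n : Int) : Prop := 0 ≤ n
instance (n : Int) : Decidable (Pre_numbers_of_letters n) := by
  unfold Pre_numbers_of_letters; infer_instance

def pvWitness_numbers_of_letters : Int := 123

def Spec_numbers_of_letters (n : Int) (out : List String) : Prop := out = numbers_of_letters_alt n
instance (n : Int) (out : List String) : Decidable (Spec_numbers_of_letters n out) := by
  unfold Spec_numbers_of_letters; infer_instance

-- ===== CLAIM (what is proved, stated in full; the proofs are below) =====
def Claim_equal_numbers_of_letters : Prop :=
  ∀ (n : Int), Dom_numbers_of_letters n → Pre_numbers_of_letters n →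
    Spec_numbers_of_letters n (numbers_of_letters n)

-- ===== LEMMAS AND PROOFS =====

theorem pvLoopA1_succ (f : Nat) (n : Int) (s : String) (acc : List String) :
    pvLoopA1 (f+1) n s acc =
      if 9 < PySem.Str.len s then
        pvLoopA1 f (PySem.Str.len (pvSpellA n)) (pvSpellA n) (acc ++ [pvSpellA n])
      else (f+1, s, acc) := rfl

theorem pvLoopA2_succ (f : Nat) (s : String) (acc : List String) :
    pvLoopA2 (f+1) s acc =
      if acc.contains "four" then acc
      else pvLoopA2 f ((PySem.List.pyGet? pvWordsA (PySem.Str.len s)).getD "")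
             (acc ++ [(PySem.List.pyGet? pvWordsA (PySem.Str.len s)).getD ""]) := rfl

theorem pvLoopB_succ (f : Nat) (s : String) (acc : List String) :
    pvLoopB (f+1) s acc =
      if acc.contains "four" then acc
      else pvLoopB f (pvSpellB (PySem.Str.len s)) (acc ++ [pvSpellB (PySem.Str.len s)]) := rfl

theorem pv_join_nil_flatten (l : List (List Char)) : PySem.Chars.join [] l = l.flatten := by
  show List.intercalate [] l = l.flatten
  simp [List.intercalate]
  induction l with
  | nil => simp
  | cons x xs ih => cases xs <;> simp_all [List.intersperse]

theorem pv_foldl_append_toList (ws : List String) (a : String) :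
    (List.foldl (fun s w => s ++ w) a ws).toList = a.toList ++ (ws.map String.toList).flatten := by
  induction ws generalizing a with
  | nil => simp
  | cons w ws ih => simp [List.foldl, ih]

theorem pv_foldl_eq_join (ws : List String) :
    List.foldl (fun s w => s ++ w) "" ws = PySem.Str.join "" ws := by
  apply String.ext
  rw [pv_foldl_append_toList, PySem.Str.toList_join]
  simp [pv_join_nil_flatten]

theorem pvSpell_eq (n : Int) : pvSpellA n = pvSpellB n := by
  unfold pvSpellA pvSpellB pvDigitsA pvWordsA pvWordsB
  rw [List.foldl_map, ← pv_foldl_eq_join, List.foldl_map]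

-- with len s ≤ 9 the two phase-2 step functions agree and the new string has length ≤ 9
theorem pv_step2_eq (s : String) (h : PySem.Str.len s ≤ 9) :
    pvSpellB (PySem.Str.len s) = (PySem.List.pyGet? pvWordsA (PySem.Str.len s)).getD "" ∧
    PySem.Str.len ((PySem.List.pyGet? pvWordsA (PySem.Str.len s)).getD "") ≤ 9 := by
  rw [PySem.Str.len_eq] at *
  have h9 : s.toList.length ≤ 9 := by exact_mod_cast h
  interval_cases h' : s.toList.length <;> exact ⟨by decide, by decide⟩

theorem pvLoop2_eq (f : Nat) (s : String) (acc : List String) (h : PySem.Str.len s ≤ 9) :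
    pvLoopA2 f s acc = pvLoopB f s acc := by
  induction f generalizing s acc with
  | zero => rfl
  | succ f ih =>
    rw [pvLoopA2_succ, pvLoopB_succ]
    by_cases hc : acc.contains "four" = true
    · rw [if_pos hc, if_pos hc]
    · rw [if_neg hc, if_neg hc, (pv_step2_eq s h).1]
      exact ih _ _ (pv_step2_eq s h).2

theorem pv_four_len : PySem.Str.len "four" = 4 := by decide

theorem pvMain (f : Nat) (s : String) (acc : List String)
    (hinv : ∀ x ∈ acc, 9 < PySem.Str.len x ∨ x = s) :
    pvLoopA2 (pvLoopA1 f (PySem.Str.len s) s acc).1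
      (pvLoopA1 f (PySem.Str.len s) s acc).2.1
      (pvLoopA1 f (PySem.Str.len s) s acc).2.2 = pvLoopB f s acc := by
  induction f generalizing s acc with
  | zero => rfl
  | succ f ih =>
    by_cases h : 9 < PySem.Str.len s
    · -- phase 1 continues; "four" cannot be in acc yet
      have hm : "four" ∉ acc := by
        intro hm
        rcases hinv _ hm with h4 | h4
        · rw [pv_four_len] at h4; omega
        · rw [← h4, pv_four_len] at h; omega
      have hc : ¬(acc.contains "four" = true) := by simpa using hm
      rw [pvLoopA1_succ, if_pos h, pvLoopB_succ, if_neg hc, pvSpell_eq]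
      exact ih (pvSpellB (PySem.Str.len s)) (acc ++ [pvSpellB (PySem.Str.len s)])
        (by
          intro x hx
          rcases List.mem_append.mp hx with hx | hx
          · rcases hinv _ hx with h4 | h4
            · exact Or.inl h4
            · exact Or.inl (h4 ▸ h)
          · exact Or.inr (List.mem_singleton.mp hx))
    · rw [pvLoopA1_succ, if_neg h]
      exact pvLoop2_eq (f+1) s acc (by omega)

-- ===== VERDICT (by name: the statement is the Claim_ definition above) =====
theorem numbers_of_letters_spec : Claim_equal_numbers_of_letters := by
  intro n _ _
  show numbers_of_letters n = numbers_of_letters_alt n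
  have ht : (9 : Int) < PySem.Str.len "this is just a template" := by decide
  have key : pvLoopA2 (pvLoopA1 (99+1) n "this is just a template" []).1
      (pvLoopA1 (99+1) n "this is just a template" []).2.1
      (pvLoopA1 (99+1) n "this is just a template" []).2.2
      = pvLoopB 99 (pvSpellB n) [pvSpellB n] := by
    rw [pvLoopA1_succ, if_pos ht, pvSpell_eq]
    exact pvMain 99 (pvSpellB n) ([] ++ [pvSpellB n])
      (by intro x hx; simp only [List.nil_append, List.mem_singleton] at hx; exact Or.inr hx)
  unfold numbers_of_letters numbers_of_letters_alt
  rw [show (100 : Nat) = 99 + 1 from rfl]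
  exact key
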